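-- pv_equiv track=rewrite | github.com/igormorais123/pesquisa-eleitoral-df | backend/app/parlamentares/ingest/cldf_provider.py | normalizar_deputado
-- ===== SOURCE A (Python) =====
-- from typing import Any, Dict, List, Optional
--
-- def normalizar_deputado(dados: Dict) -> Dict:
--     """
--     Normaliza dados de um deputado para formato padrão.
--
--     Mapeia diferentes formatos de entrada para o schema esperado.
--     """
--     # Se já está no formato esperado (legado)
--     if "nome_parlamentar" in dados and "partido" in dados:
--         return dados
--
--     # Mapear campos comuns
--     mapeamentos = {
--         "nome": ["nome", "nome_deputado", "name", "deputado"],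
--         "nome_parlamentar": ["nome_parlamentar", "nome_urna", "nome_politico"],
--         "partido": ["partido", "sigla_partido", "party"],
--         "email": ["email", "email_contato", "contato"],
--         "telefone": ["telefone", "telefone_gabinete", "phone"],
--         "foto": ["foto", "foto_url", "url_foto", "imagem"],
--     }
--
--     resultado = {}
--     for campo_padrao, alternativas in mapeamentos.items():
--         for alt in alternativas:
--             if alt in dados and dados[alt]:
--                 resultado[campo_padrao] = dados[alt]
--                 break
--
--     # Copiar campos não mapeados
--     for key, value in dados.items():
--         if key not in resultado:
--             resultado[key] = value
--
--     return resultado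
-- ===== SOURCE B (Python) =====
-- _MAPEAMENTOS = {
--     "nome": ["nome", "nome_deputado", "name", "deputado"],
--     "nome_parlamentar": ["nome_parlamentar", "nome_urna", "nome_politico"],
--     "partido": ["partido", "sigla_partido", "party"],
--     "email": ["email", "email_contato", "contato"],
--     "telefone": ["telefone", "telefone_gabinete", "phone"],
--     "foto": ["foto", "foto_url", "url_foto", "imagem"],
-- }
--
-- # inverted index: alternative name -> (standard field, priority = position in its list)
-- _ALT_INDEX = {alt: (campo, pr)
--               for campo, alts in _MAPEAMENTOS.items()
--               for pr, alt in enumerate(alts)}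
--
-- _FIELDS = list(_MAPEAMENTOS)
--
--
-- def normalizar_deputado(dados):
--     """Same mapping as the table-scan version, via an inverted index and one pass."""
--     if "nome_parlamentar" in dados and "partido" in dados:
--         return dados
--
--     # one pass over the input: best (lowest-priority-index) truthy candidate per field
--     best = {}
--     for key, value in dados.items():
--         if value:
--             hit = _ALT_INDEX.get(key)
--             if hit is not None:
--                 campo, pr = hit
--                 if campo not in best or pr < best[campo][0]:
--                     best[campo] = (pr, value)
--
--     resultado = {campo: best[campo][1] for campo in _FIELDS if campo in best}
--
--     # passthrough: every input key that is not an emitted standard field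
--     for key, value in dados.items():
--         if key not in resultado:
--             resultado[key] = value
--     return resultado
-- ===== Notes on version B (the rewrite author's own statement) =====
-- stated objective: alternative
-- what changed: Replaces A's nested scan (for each standard field, try its alternatives in order against the dict) by an inverted index from alternative name to (standard field, priority) plus a single candidate-collecting pass over the input items, then emits the best candidate per field and the passthrough keys.
import Mathlib
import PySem

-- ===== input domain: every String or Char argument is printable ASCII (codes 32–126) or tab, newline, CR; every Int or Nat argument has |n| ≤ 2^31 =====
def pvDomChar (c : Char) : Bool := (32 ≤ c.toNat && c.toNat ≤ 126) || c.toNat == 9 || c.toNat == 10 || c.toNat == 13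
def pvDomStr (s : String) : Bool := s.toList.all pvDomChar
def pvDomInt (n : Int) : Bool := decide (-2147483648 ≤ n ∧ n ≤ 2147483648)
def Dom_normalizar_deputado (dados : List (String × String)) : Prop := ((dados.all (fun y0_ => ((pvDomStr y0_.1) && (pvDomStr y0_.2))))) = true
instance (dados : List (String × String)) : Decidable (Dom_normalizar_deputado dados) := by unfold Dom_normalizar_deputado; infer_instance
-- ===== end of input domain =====

-- B replaces A's nested standard-field-then-alternatives scan by an inverted index
-- (alternative name → (standard field, priority)) plus one candidate-collecting pass
-- over the input; objective: alternative decomposition, same asymptotic cost.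

-- ===== PORT A =====
def pvMapeamentos : List (String × List String) :=
  [("nome", ["nome", "nome_deputado", "name", "deputado"]),
   ("nome_parlamentar", ["nome_parlamentar", "nome_urna", "nome_politico"]),
   ("partido", ["partido", "sigla_partido", "party"]),
   ("email", ["email", "email_contato", "contato"]),
   ("telefone", ["telefone", "telefone_gabinete", "phone"]),
   ("foto", ["foto", "foto_url", "url_foto", "imagem"])]

-- A's inner 'for alt in alternativas: … break' loop
def pvFirstAlt (d : PySem.Dict String String) : List String → Option String
  | [] => none
  | a :: rest =>
    match d.get? a with
    | some v => if v ≠ "" then some v else pvFirstAlt d rest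
    | none => pvFirstAlt d rest

def normalizar_deputado (dados : List (String × String)) : List (String × String) :=
  let d := PySem.Dict.mk dados
  if d.contains "nome_parlamentar" && d.contains "partido" then dados
  else
    let resultado := pvMapeamentos.foldl (fun res cp =>
      match pvFirstAlt d cp.2 with
      | some v => res.insert cp.1 v
      | none => res) PySem.Dict.empty
    (dados.foldl (fun res kv =>
      if res.contains kv.1 then res else res.insert kv.1 kv.2) resultado).items

-- ===== PORT B =====
-- the inverted index _ALT_INDEX of Source B, in its construction order
def pvAltIndex : List (String × String × Nat) :=
  [("nome", ("nome", 0)), ("nome_deputado", ("nome", 1)), ("name", ("nome", 2)), ("deputado", ("nome", 3)),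
   ("nome_parlamentar", ("nome_parlamentar", 0)), ("nome_urna", ("nome_parlamentar", 1)), ("nome_politico", ("nome_parlamentar", 2)),
   ("partido", ("partido", 0)), ("sigla_partido", ("partido", 1)), ("party", ("partido", 2)),
   ("email", ("email", 0)), ("email_contato", ("email", 1)), ("contato", ("email", 2)),
   ("telefone", ("telefone", 0)), ("telefone_gabinete", ("telefone", 1)), ("phone", ("telefone", 2)),
   ("foto", ("foto", 0)), ("foto_url", ("foto", 1)), ("url_foto", ("foto", 2)), ("imagem", ("foto", 3))]

def pvFields : List String := ["nome", "nome_parlamentar", "partido", "email", "telefone", "foto"]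

-- body of Source B's single candidate-collecting pass
def pvBestStep (ai : PySem.Dict String (String × Nat)) (b : PySem.Dict String (Nat × String))
    (kv : String × String) : PySem.Dict String (Nat × String) :=
  if kv.2 ≠ "" then
    match ai.get? kv.1 with
    | some cp =>
      match b.get? cp.1 with
      | some pv => if cp.2 < pv.1 then b.insert cp.1 (cp.2, kv.2) else b
      | none => b.insert cp.1 (cp.2, kv.2)
    | none => b
  else b

def normalizar_deputado_alt (dados : List (String × String)) : List (String × String) :=
  let d := PySem.Dict.mk dados
  if d.contains "nome_parlamentar" && d.contains "partido" then dados
  else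
    let best := dados.foldl (pvBestStep (PySem.Dict.mk pvAltIndex)) PySem.Dict.empty
    let resultado := pvFields.foldl (fun res campo =>
      match best.get? campo with
      | some pv => res.insert campo pv.2
      | none => res) PySem.Dict.empty
    (dados.foldl (fun res kv =>
      if res.contains kv.1 then res else res.insert kv.1 kv.2) resultado).items

-- ===== PRECONDITION & SPEC =====
-- Pre_ requires distinct keys: the association list stands for a Python dict (whose keys are
-- always distinct), so no input the Python function can actually receive is excluded.
def Pre_normalizar_deputado (dados : List (String × String)) : Prop := (dados.map Prod.fst).Nodup
instance (dados : List (String × String)) : Decidable (Pre_normalizar_deputado dados) := by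
  unfold Pre_normalizar_deputado; infer_instance

def pvWitness_normalizar_deputado : (List (String × String)) :=
  [("nome_deputado", "Ana Silva"), ("gabinete", "12")]

def Spec_normalizar_deputado (dados : List (String × String)) (out : List (String × String)) : Prop := out = normalizar_deputado_alt dados
instance (dados : List (String × String)) (out : List (String × String)) : Decidable (Spec_normalizar_deputado dados out) := by unfold Spec_normalizar_deputado; infer_instance

-- ===== CLAIM (what is proved, stated in full; the proofs are below) =====
def Claim_equal_normalizar_deputado : Prop := ∀ (dados : List (String × String)), Dom_normalizar_deputado dados → Pre_normalizar_deputado dados → Spec_normalizar_deputado dados (normalizar_deputado dados)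

-- ===== LEMMAS AND PROOFS =====

def pvM : Option (Nat × String) → Option (Nat × String) → Option (Nat × String)
  | x, none => x
  | none, y => y
  | some a, some b => if b.1 < a.1 then some b else some a
theorem pvM_none_left (y : Option (Nat × String)) : pvM none y = y := by cases y <;> rfl
theorem pvM_none_right (x : Option (Nat × String)) : pvM x none = x := rfl
theorem pvM_assoc (x y z : Option (Nat × String)) : pvM (pvM x y) z = pvM x (pvM y z) := by
  rcases x with _ | a <;> rcases y with _ | b <;> rcases z with _ | c <;>
    first
    | rfl
    | (simp only [pvM_none_left]; try rfl)
    | skip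
  case some.some.some =>
    by_cases h1 : b.1 < a.1 <;> by_cases h2 : c.1 < b.1 <;> by_cases h3 : c.1 < a.1 <;>
      simp [pvM, h1, h2, h3] <;> omega
def pvCand1I (c : String) (kv : String × String) : Option (Nat × String) :=
  if kv.2 ≠ "" then
    match (PySem.Dict.mk pvAltIndex).get? kv.1 with
    | some cp => if cp.1 = c then some (cp.2, kv.2) else none
    | none => none
  else none

theorem pvBestStep_get? (b : PySem.Dict String (Nat × String)) (kv : String × String) (c : String) :
    (pvBestStep (PySem.Dict.mk pvAltIndex) b kv).get? c = pvM (b.get? c) (pvCand1I c kv) := by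
  unfold pvBestStep pvCand1I
  by_cases hv : kv.2 ≠ ""
  · rw [if_pos hv]
    conv_rhs => rw [if_pos hv]
    rcases hai : (PySem.Dict.mk pvAltIndex).get? kv.1 with _ | cp
    · exact (pvM_none_right _).symm
    · by_cases hc : cp.1 = c
      · subst hc
        rcases hb : b.get? cp.1 with _ | pv
        · simp [hb, PySem.Dict.get?_insert_self, pvM_none_left, pvM]
        · by_cases hlt : cp.2 < pv.1 <;>
            simp [hb, hlt, PySem.Dict.get?_insert_self, pvM]
      · have hne : c ≠ cp.1 := fun h => hc h.symm
        rcases hb : b.get? cp.1 with _ | pv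
        · simp [hb, hc, PySem.Dict.get?_insert_of_ne _ _ hne, pvM_none_right]
        · by_cases hlt : cp.2 < pv.1 <;>
            simp [hb, hc, hlt, PySem.Dict.get?_insert_of_ne _ _ hne, pvM_none_right]
  · rw [if_neg hv]
    conv_rhs => rw [if_neg hv]
    exact (pvM_none_right _).symm
def pvAltPr : List String → String → Option Nat
  | [], _ => none
  | a :: as, k => if a == k then some 0 else (pvAltPr as k).map (· + 1)
def pvCand1 (alts : List String) (kv : String × String) : Option (Nat × String) :=
  if kv.2 ≠ "" then (pvAltPr alts kv.1).map (fun j => (j, kv.2)) else none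
theorem pvGet?_mk_nil {v : Type} (k : String) : (PySem.Dict.mk ([] : List (String × v))).get? k = none := rfl
theorem pvCand1I_nome (kv : String × String) : pvCand1I "nome" kv = pvCand1 ["nome", "nome_deputado", "name", "deputado"] kv := by
  obtain ⟨k, v⟩ := kv
  unfold pvCand1I pvCand1
  by_cases hv : v ≠ ""
  · rw [if_pos hv]; conv_rhs => rw [if_pos hv]
    by_cases h1 : k = "nome"
    · subst h1; rfl
    by_cases h2 : k = "nome_deputado"
    · subst h2; rfl
    by_cases h3 : k = "name"
    · subst h3; rfl
    by_cases h4 : k = "deputado"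
    · subst h4; rfl
    by_cases h5 : k = "nome_parlamentar"
    · subst h5; rfl
    by_cases h6 : k = "nome_urna"
    · subst h6; rfl
    by_cases h7 : k = "nome_politico"
    · subst h7; rfl
    by_cases h8 : k = "partido"
    · subst h8; rfl
    by_cases h9 : k = "sigla_partido"
    · subst h9; rfl
    by_cases h10 : k = "party"
    · subst h10; rfl
    by_cases h11 : k = "email"
    · subst h11; rfl
    by_cases h12 : k = "email_contato"
    · subst h12; rfl
    by_cases h13 : k = "contato"
    · subst h13; rfl
    by_cases h14 : k = "telefone"
    · subst h14; rfl
    by_cases h15 : k = "telefone_gabinete"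
    · subst h15; rfl
    by_cases h16 : k = "phone"
    · subst h16; rfl
    by_cases h17 : k = "foto"
    · subst h17; rfl
    by_cases h18 : k = "foto_url"
    · subst h18; rfl
    by_cases h19 : k = "url_foto"
    · subst h19; rfl
    by_cases h20 : k = "imagem"
    · subst h20; rfl
    simp [pvAltIndex, PySem.Dict.get?_mk_cons, pvGet?_mk_nil, pvAltPr, beq_iff_eq, Ne.symm h1, Ne.symm h2, Ne.symm h3, Ne.symm h4, Ne.symm h5, Ne.symm h6, Ne.symm h7, Ne.symm h8, Ne.symm h9, Ne.symm h10, Ne.symm h11, Ne.symm h12, Ne.symm h13, Ne.symm h14, Ne.symm h15, Ne.symm h16, Ne.symm h17, Ne.symm h18, Ne.symm h19, Ne.symm h20]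
  · rw [if_neg hv]; conv_rhs => rw [if_neg hv]

theorem pvCand1I_np (kv : String × String) : pvCand1I "nome_parlamentar" kv = pvCand1 ["nome_parlamentar", "nome_urna", "nome_politico"] kv := by
  obtain ⟨k, v⟩ := kv
  unfold pvCand1I pvCand1
  by_cases hv : v ≠ ""
  · rw [if_pos hv]; conv_rhs => rw [if_pos hv]
    by_cases h1 : k = "nome"
    · subst h1; rfl
    by_cases h2 : k = "nome_deputado"
    · subst h2; rfl
    by_cases h3 : k = "name"
    · subst h3; rfl
    by_cases h4 : k = "deputado"
    · subst h4; rfl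
    by_cases h5 : k = "nome_parlamentar"
    · subst h5; rfl
    by_cases h6 : k = "nome_urna"
    · subst h6; rfl
    by_cases h7 : k = "nome_politico"
    · subst h7; rfl
    by_cases h8 : k = "partido"
    · subst h8; rfl
    by_cases h9 : k = "sigla_partido"
    · subst h9; rfl
    by_cases h10 : k = "party"
    · subst h10; rfl
    by_cases h11 : k = "email"
    · subst h11; rfl
    by_cases h12 : k = "email_contato"
    · subst h12; rfl
    by_cases h13 : k = "contato"
    · subst h13; rfl
    by_cases h14 : k = "telefone"
    · subst h14; rfl
    by_cases h15 : k = "telefone_gabinete"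
    · subst h15; rfl
    by_cases h16 : k = "phone"
    · subst h16; rfl
    by_cases h17 : k = "foto"
    · subst h17; rfl
    by_cases h18 : k = "foto_url"
    · subst h18; rfl
    by_cases h19 : k = "url_foto"
    · subst h19; rfl
    by_cases h20 : k = "imagem"
    · subst h20; rfl
    simp [pvAltIndex, PySem.Dict.get?_mk_cons, pvGet?_mk_nil, pvAltPr, beq_iff_eq, Ne.symm h1, Ne.symm h2, Ne.symm h3, Ne.symm h4, Ne.symm h5, Ne.symm h6, Ne.symm h7, Ne.symm h8, Ne.symm h9, Ne.symm h10, Ne.symm h11, Ne.symm h12, Ne.symm h13, Ne.symm h14, Ne.symm h15, Ne.symm h16, Ne.symm h17, Ne.symm h18, Ne.symm h19, Ne.symm h20]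
  · rw [if_neg hv]; conv_rhs => rw [if_neg hv]

theorem pvCand1I_partido (kv : String × String) : pvCand1I "partido" kv = pvCand1 ["partido", "sigla_partido", "party"] kv := by
  obtain ⟨k, v⟩ := kv
  unfold pvCand1I pvCand1
  by_cases hv : v ≠ ""
  · rw [if_pos hv]; conv_rhs => rw [if_pos hv]
    by_cases h1 : k = "nome"
    · subst h1; rfl
    by_cases h2 : k = "nome_deputado"
    · subst h2; rfl
    by_cases h3 : k = "name"
    · subst h3; rfl
    by_cases h4 : k = "deputado"
    · subst h4; rfl
    by_cases h5 : k = "nome_parlamentar"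
    · subst h5; rfl
    by_cases h6 : k = "nome_urna"
    · subst h6; rfl
    by_cases h7 : k = "nome_politico"
    · subst h7; rfl
    by_cases h8 : k = "partido"
    · subst h8; rfl
    by_cases h9 : k = "sigla_partido"
    · subst h9; rfl
    by_cases h10 : k = "party"
    · subst h10; rfl
    by_cases h11 : k = "email"
    · subst h11; rfl
    by_cases h12 : k = "email_contato"
    · subst h12; rfl
    by_cases h13 : k = "contato"
    · subst h13; rfl
    by_cases h14 : k = "telefone"
    · subst h14; rfl
    by_cases h15 : k = "telefone_gabinete"
    · subst h15; rfl
    by_cases h16 : k = "phone"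
    · subst h16; rfl
    by_cases h17 : k = "foto"
    · subst h17; rfl
    by_cases h18 : k = "foto_url"
    · subst h18; rfl
    by_cases h19 : k = "url_foto"
    · subst h19; rfl
    by_cases h20 : k = "imagem"
    · subst h20; rfl
    simp [pvAltIndex, PySem.Dict.get?_mk_cons, pvGet?_mk_nil, pvAltPr, beq_iff_eq, Ne.symm h1, Ne.symm h2, Ne.symm h3, Ne.symm h4, Ne.symm h5, Ne.symm h6, Ne.symm h7, Ne.symm h8, Ne.symm h9, Ne.symm h10, Ne.symm h11, Ne.symm h12, Ne.symm h13, Ne.symm h14, Ne.symm h15, Ne.symm h16, Ne.symm h17, Ne.symm h18, Ne.symm h19, Ne.symm h20]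
  · rw [if_neg hv]; conv_rhs => rw [if_neg hv]

theorem pvCand1I_email (kv : String × String) : pvCand1I "email" kv = pvCand1 ["email", "email_contato", "contato"] kv := by
  obtain ⟨k, v⟩ := kv
  unfold pvCand1I pvCand1
  by_cases hv : v ≠ ""
  · rw [if_pos hv]; conv_rhs => rw [if_pos hv]
    by_cases h1 : k = "nome"
    · subst h1; rfl
    by_cases h2 : k = "nome_deputado"
    · subst h2; rfl
    by_cases h3 : k = "name"
    · subst h3; rfl
    by_cases h4 : k = "deputado"
    · subst h4; rfl
    by_cases h5 : k = "nome_parlamentar"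
    · subst h5; rfl
    by_cases h6 : k = "nome_urna"
    · subst h6; rfl
    by_cases h7 : k = "nome_politico"
    · subst h7; rfl
    by_cases h8 : k = "partido"
    · subst h8; rfl
    by_cases h9 : k = "sigla_partido"
    · subst h9; rfl
    by_cases h10 : k = "party"
    · subst h10; rfl
    by_cases h11 : k = "email"
    · subst h11; rfl
    by_cases h12 : k = "email_contato"
    · subst h12; rfl
    by_cases h13 : k = "contato"
    · subst h13; rfl
    by_cases h14 : k = "telefone"
    · subst h14; rfl
    by_cases h15 : k = "telefone_gabinete"
    · subst h15; rfl
    by_cases h16 : k = "phone"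
    · subst h16; rfl
    by_cases h17 : k = "foto"
    · subst h17; rfl
    by_cases h18 : k = "foto_url"
    · subst h18; rfl
    by_cases h19 : k = "url_foto"
    · subst h19; rfl
    by_cases h20 : k = "imagem"
    · subst h20; rfl
    simp [pvAltIndex, PySem.Dict.get?_mk_cons, pvGet?_mk_nil, pvAltPr, beq_iff_eq, Ne.symm h1, Ne.symm h2, Ne.symm h3, Ne.symm h4, Ne.symm h5, Ne.symm h6, Ne.symm h7, Ne.symm h8, Ne.symm h9, Ne.symm h10, Ne.symm h11, Ne.symm h12, Ne.symm h13, Ne.symm h14, Ne.symm h15, Ne.symm h16, Ne.symm h17, Ne.symm h18, Ne.symm h19, Ne.symm h20]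
  · rw [if_neg hv]; conv_rhs => rw [if_neg hv]

theorem pvCand1I_telefone (kv : String × String) : pvCand1I "telefone" kv = pvCand1 ["telefone", "telefone_gabinete", "phone"] kv := by
  obtain ⟨k, v⟩ := kv
  unfold pvCand1I pvCand1
  by_cases hv : v ≠ ""
  · rw [if_pos hv]; conv_rhs => rw [if_pos hv]
    by_cases h1 : k = "nome"
    · subst h1; rfl
    by_cases h2 : k = "nome_deputado"
    · subst h2; rfl
    by_cases h3 : k = "name"
    · subst h3; rfl
    by_cases h4 : k = "deputado"
    · subst h4; rfl
    by_cases h5 : k = "nome_parlamentar"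
    · subst h5; rfl
    by_cases h6 : k = "nome_urna"
    · subst h6; rfl
    by_cases h7 : k = "nome_politico"
    · subst h7; rfl
    by_cases h8 : k = "partido"
    · subst h8; rfl
    by_cases h9 : k = "sigla_partido"
    · subst h9; rfl
    by_cases h10 : k = "party"
    · subst h10; rfl
    by_cases h11 : k = "email"
    · subst h11; rfl
    by_cases h12 : k = "email_contato"
    · subst h12; rfl
    by_cases h13 : k = "contato"
    · subst h13; rfl
    by_cases h14 : k = "telefone"
    · subst h14; rfl
    by_cases h15 : k = "telefone_gabinete"
    · subst h15; rfl
    by_cases h16 : k = "phone"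
    · subst h16; rfl
    by_cases h17 : k = "foto"
    · subst h17; rfl
    by_cases h18 : k = "foto_url"
    · subst h18; rfl
    by_cases h19 : k = "url_foto"
    · subst h19; rfl
    by_cases h20 : k = "imagem"
    · subst h20; rfl
    simp [pvAltIndex, PySem.Dict.get?_mk_cons, pvGet?_mk_nil, pvAltPr, beq_iff_eq, Ne.symm h1, Ne.symm h2, Ne.symm h3, Ne.symm h4, Ne.symm h5, Ne.symm h6, Ne.symm h7, Ne.symm h8, Ne.symm h9, Ne.symm h10, Ne.symm h11, Ne.symm h12, Ne.symm h13, Ne.symm h14, Ne.symm h15, Ne.symm h16, Ne.symm h17, Ne.symm h18, Ne.symm h19, Ne.symm h20]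
  · rw [if_neg hv]; conv_rhs => rw [if_neg hv]

theorem pvCand1I_foto (kv : String × String) : pvCand1I "foto" kv = pvCand1 ["foto", "foto_url", "url_foto", "imagem"] kv := by
  obtain ⟨k, v⟩ := kv
  unfold pvCand1I pvCand1
  by_cases hv : v ≠ ""
  · rw [if_pos hv]; conv_rhs => rw [if_pos hv]
    by_cases h1 : k = "nome"
    · subst h1; rfl
    by_cases h2 : k = "nome_deputado"
    · subst h2; rfl
    by_cases h3 : k = "name"
    · subst h3; rfl
    by_cases h4 : k = "deputado"
    · subst h4; rfl
    by_cases h5 : k = "nome_parlamentar"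
    · subst h5; rfl
    by_cases h6 : k = "nome_urna"
    · subst h6; rfl
    by_cases h7 : k = "nome_politico"
    · subst h7; rfl
    by_cases h8 : k = "partido"
    · subst h8; rfl
    by_cases h9 : k = "sigla_partido"
    · subst h9; rfl
    by_cases h10 : k = "party"
    · subst h10; rfl
    by_cases h11 : k = "email"
    · subst h11; rfl
    by_cases h12 : k = "email_contato"
    · subst h12; rfl
    by_cases h13 : k = "contato"
    · subst h13; rfl
    by_cases h14 : k = "telefone"
    · subst h14; rfl
    by_cases h15 : k = "telefone_gabinete"
    · subst h15; rfl
    by_cases h16 : k = "phone"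
    · subst h16; rfl
    by_cases h17 : k = "foto"
    · subst h17; rfl
    by_cases h18 : k = "foto_url"
    · subst h18; rfl
    by_cases h19 : k = "url_foto"
    · subst h19; rfl
    by_cases h20 : k = "imagem"
    · subst h20; rfl
    simp [pvAltIndex, PySem.Dict.get?_mk_cons, pvGet?_mk_nil, pvAltPr, beq_iff_eq, Ne.symm h1, Ne.symm h2, Ne.symm h3, Ne.symm h4, Ne.symm h5, Ne.symm h6, Ne.symm h7, Ne.symm h8, Ne.symm h9, Ne.symm h10, Ne.symm h11, Ne.symm h12, Ne.symm h13, Ne.symm h14, Ne.symm h15, Ne.symm h16, Ne.symm h17, Ne.symm h18, Ne.symm h19, Ne.symm h20]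
  · rw [if_neg hv]; conv_rhs => rw [if_neg hv]
def pvFaux (d : PySem.Dict String String) : List String → Nat → Option (Nat × String)
  | [], _ => none
  | a :: rest, n =>
    match d.get? a with
    | some v => if v ≠ "" then some (n, v) else pvFaux d rest (n + 1)
    | none => pvFaux d rest (n + 1)

theorem pvFaux_ge (d : PySem.Dict String String) (alts : List String) (n : Nat) (p : Nat × String)
    (h : pvFaux d alts n = some p) : n ≤ p.1 := by
  induction alts generalizing n with
  | nil => simp [pvFaux] at h
  | cons a as ih =>
    simp only [pvFaux] at h
    rcases hg : d.get? a with _ | v <;> simp only [hg] at h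
    · exact Nat.le_of_succ_le (ih (n + 1) h)
    · by_cases hv : v ≠ ""
      · rw [if_pos hv] at h
        injection h with h
        subst h
        exact Nat.le_refl n
      · rw [if_neg hv] at h
        exact Nat.le_of_succ_le (ih (n + 1) h)

theorem pvFaux_empty (alts : List String) (n : Nat) : pvFaux (PySem.Dict.mk []) alts n = none := by
  induction alts generalizing n with
  | nil => rfl
  | cons a as ih => simp only [pvFaux, pvGet?_mk_nil]; exact ih (n + 1)

theorem pvFaux_cons (alts : List String) (k v : String) (rest : List (String × String)) (n : Nat)
    (hk : (PySem.Dict.mk rest).get? k = none) :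
    pvFaux (PySem.Dict.mk ((k, v) :: rest)) alts n =
      pvM (if v ≠ "" then (pvAltPr alts k).map (fun j => (n + j, v)) else none)
          (pvFaux (PySem.Dict.mk rest) alts n) := by
  induction alts generalizing n with
  | nil => by_cases hv : v ≠ "" <;> simp [pvFaux, pvAltPr, pvM, hv]
  | cons a as ih =>
    have harith : ∀ j : Nat, n + 1 + j = n + (j + 1) := by omega
    by_cases hka : k = a
    · subst hka
      by_cases hv : v ≠ ""
      · rcases hf : pvFaux (PySem.Dict.mk rest) as (n + 1) with _ | p
        · simp [pvFaux, PySem.Dict.get?_mk_cons, pvAltPr, pvM, hv, hk, hf]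
        · have hp := pvFaux_ge _ _ _ _ hf
          simp [pvFaux, PySem.Dict.get?_mk_cons, pvAltPr, pvM, hv, hk, hf]
          intro hlt
          exact absurd hp (by omega)
      · simp [pvFaux, PySem.Dict.get?_mk_cons, pvAltPr, pvM_none_left, hv, hk, ih]
    · have hka' : (k == a) = false := by simp [beq_iff_eq]; exact hka
      have hak : (a == k) = false := by simp [beq_iff_eq]; exact fun h => hka h.symm
      rcases hg : (PySem.Dict.mk rest).get? a with _ | u
      · simp only [pvFaux, PySem.Dict.get?_mk_cons, hka', if_false, hg, ih, pvAltPr, hak]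
        rcases hpr : pvAltPr as k with _ | j <;> by_cases hv : v ≠ "" <;>
          simp [hpr, hv, harith]
      · by_cases hu : u ≠ ""
        · simp only [pvFaux, PySem.Dict.get?_mk_cons, hka', if_false, hg, pvAltPr, hak]
          rcases hpr : pvAltPr as k with _ | j <;> by_cases hv : v ≠ "" <;>
            simp [pvM, hpr, hv, hu]
        · simp only [pvFaux, PySem.Dict.get?_mk_cons, hka', if_false, hg, ih, pvAltPr, hak]
          rcases hpr : pvAltPr as k with _ | j <;> by_cases hv : v ≠ "" <;>
            simp [hpr, hv, hu, harith]
def pvCandAll (alts : List String) : List (String × String) → Option (Nat × String)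
  | [] => none
  | kv :: rest => pvM (pvCand1 alts kv) (pvCandAll alts rest)

def pvCandAllI (c : String) : List (String × String) → Option (Nat × String)
  | [] => none
  | kv :: rest => pvM (pvCand1I c kv) (pvCandAllI c rest)

theorem pvFoldBest_get? (dados : List (String × String)) (b : PySem.Dict String (Nat × String)) (c : String) :
    (dados.foldl (pvBestStep (PySem.Dict.mk pvAltIndex)) b).get? c = pvM (b.get? c) (pvCandAllI c dados) := by
  induction dados generalizing b with
  | nil => rfl
  | cons kv rest ih =>
    simp only [List.foldl_cons, pvCandAllI, ih, pvBestStep_get?, pvM_assoc]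

theorem pvCandAllI_eq (c : String) (alts : List String)
    (h : ∀ kv, pvCand1I c kv = pvCand1 alts kv) (dados : List (String × String)) :
    pvCandAllI c dados = pvCandAll alts dados := by
  induction dados with
  | nil => rfl
  | cons kv rest ih => simp only [pvCandAllI, pvCandAll, h, ih]

theorem pvCandAll_eq_faux (dados : List (String × String)) (h : (dados.map Prod.fst).Nodup)
    (alts : List String) :
    pvCandAll alts dados = pvFaux (PySem.Dict.mk dados) alts 0 := by
  induction dados with
  | nil => rw [pvFaux_empty]; rfl
  | cons kv rest ih =>
    simp only [List.map_cons, List.nodup_cons] at h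
    have hk : (PySem.Dict.mk rest).get? kv.1 = none := by
      rw [PySem.Dict.get?_eq_none_iff_not_mem_keys]
      simpa using h.1
    obtain ⟨k, v⟩ := kv
    simp only [pvCandAll, ih h.2, pvCand1]
    rw [pvFaux_cons alts k v rest 0 hk]
    simp only [Nat.zero_add]

theorem pvFirstAlt_eq_faux (d : PySem.Dict String String) (alts : List String) (n : Nat) :
    pvFirstAlt d alts = (pvFaux d alts n).map (·.2) := by
  induction alts generalizing n with
  | nil => rfl
  | cons a as ih =>
    simp only [pvFirstAlt, pvFaux]
    rcases hg : d.get? a with _ | v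
    · exact ih (n + 1)
    · by_cases hv : v ≠ "" <;> simp [hv, ih (n + 1)]

theorem pvFirstAlt_faux0 (d : PySem.Dict String String) (alts : List String) :
    pvFirstAlt d alts = (pvFaux d alts 0).map (·.2) := pvFirstAlt_eq_faux d alts 0

theorem pvBest_get?_eq (dados : List (String × String)) (h : (dados.map Prod.fst).Nodup)
    (c : String) (alts : List String) (hc : ∀ kv, pvCand1I c kv = pvCand1 alts kv) :
    (dados.foldl (pvBestStep (PySem.Dict.mk pvAltIndex)) PySem.Dict.empty).get? c =
      pvFaux (PySem.Dict.mk dados) alts 0 := by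
  rw [pvFoldBest_get?, PySem.Dict.get?_empty, pvM_none_left, pvCandAllI_eq c alts hc,
    pvCandAll_eq_faux dados h alts]

theorem pvResultado_eq (dados : List (String × String)) (h : (dados.map Prod.fst).Nodup) :
    pvMapeamentos.foldl (fun res cp =>
      match pvFirstAlt (PySem.Dict.mk dados) cp.2 with
      | some v => res.insert cp.1 v
      | none => res) PySem.Dict.empty =
    pvFields.foldl (fun res campo =>
      match (dados.foldl (pvBestStep (PySem.Dict.mk pvAltIndex)) PySem.Dict.empty).get? campo with
      | some pv => res.insert campo pv.2
      | none => res) PySem.Dict.empty := by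
  simp only [pvMapeamentos, pvFields, List.foldl_cons, List.foldl_nil, pvFirstAlt_faux0,
    pvBest_get?_eq dados h "nome" _ pvCand1I_nome,
    pvBest_get?_eq dados h "nome_parlamentar" _ pvCand1I_np,
    pvBest_get?_eq dados h "partido" _ pvCand1I_partido,
    pvBest_get?_eq dados h "email" _ pvCand1I_email,
    pvBest_get?_eq dados h "telefone" _ pvCand1I_telefone,
    pvBest_get?_eq dados h "foto" _ pvCand1I_foto]
  rcases pvFaux (PySem.Dict.mk dados) ["nome", "nome_deputado", "name", "deputado"] 0 with _ | p1 <;>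
  rcases pvFaux (PySem.Dict.mk dados) ["nome_parlamentar", "nome_urna", "nome_politico"] 0 with _ | p2 <;>
  rcases pvFaux (PySem.Dict.mk dados) ["partido", "sigla_partido", "party"] 0 with _ | p3 <;>
  rcases pvFaux (PySem.Dict.mk dados) ["email", "email_contato", "contato"] 0 with _ | p4 <;>
  rcases pvFaux (PySem.Dict.mk dados) ["telefone", "telefone_gabinete", "phone"] 0 with _ | p5 <;>
  rcases pvFaux (PySem.Dict.mk dados) ["foto", "foto_url", "url_foto", "imagem"] 0 with _ | p6 <;>
  rfl

-- ===== VERDICT (by name: the statement is the Claim_ definition above) =====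
theorem normalizar_deputado_spec : Claim_equal_normalizar_deputado := by
  intro dados _ hpre
  unfold Spec_normalizar_deputado normalizar_deputado normalizar_deputado_alt
  by_cases hret : ((PySem.Dict.mk dados).contains "nome_parlamentar" && (PySem.Dict.mk dados).contains "partido") = true
  · simp only [hret, if_true]
  · simp only [hret, if_false, Bool.false_eq_true]
    rw [pvResultado_eq dados hpre]
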